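-- pv_equiv track=rewrite | github.com/michalasia10/dietMaker | source/features/user/meal/crud.py | find_and_update
-- ===== SOURCE A (Python) =====
-- def find_and_update(user_meals:list,updated_dict,meal_name:str):
--     data : dict
--     for data in user_meals:
--         meal : dict
--         if meal_name in [k['meal'] for k in data['meals']]:
--             for meal in data['meals']:
--                 if meal['meal'] == meal_name:
--                     meal.update(updated_dict)
--         else:
--             data['meals'].append(updated_dict)
--     return user_meals
-- ===== SOURCE B (Python) =====
-- def find_and_update(user_meals: list, updated_dict, meal_name: str):
--     # Pure one-pass rebuild: no mutation of the input; per data dict a single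
--     # scan over its meals with a 'found' flag replaces A's membership pre-scan.
--     result = []
--     for data in user_meals:
--         new_meals = []
--         found = False
--         for meal in data['meals']:
--             if meal.get('meal') == meal_name:
--                 found = True
--                 merged = dict(meal)
--                 merged.update(updated_dict)
--                 new_meals.append(merged)
--             else:
--                 new_meals.append(meal)
--         if not found:
--             new_meals.append(updated_dict)
--         result.append({**data, 'meals': new_meals})
--     return result
-- ===== Notes on version B (the rewrite author's own statement) =====
-- stated objective: alternative
-- what changed: A mutates user_meals in place with a two-pass per-data scheme (a list-comprehension membership test over data['meals'], then a second update loop or an append); B rebuilds the result purely in a single pass per data, maintaining a 'found' flag and emitting merged copies, so the membership pre-scan disappears and the input is never mutated.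
import Mathlib
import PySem

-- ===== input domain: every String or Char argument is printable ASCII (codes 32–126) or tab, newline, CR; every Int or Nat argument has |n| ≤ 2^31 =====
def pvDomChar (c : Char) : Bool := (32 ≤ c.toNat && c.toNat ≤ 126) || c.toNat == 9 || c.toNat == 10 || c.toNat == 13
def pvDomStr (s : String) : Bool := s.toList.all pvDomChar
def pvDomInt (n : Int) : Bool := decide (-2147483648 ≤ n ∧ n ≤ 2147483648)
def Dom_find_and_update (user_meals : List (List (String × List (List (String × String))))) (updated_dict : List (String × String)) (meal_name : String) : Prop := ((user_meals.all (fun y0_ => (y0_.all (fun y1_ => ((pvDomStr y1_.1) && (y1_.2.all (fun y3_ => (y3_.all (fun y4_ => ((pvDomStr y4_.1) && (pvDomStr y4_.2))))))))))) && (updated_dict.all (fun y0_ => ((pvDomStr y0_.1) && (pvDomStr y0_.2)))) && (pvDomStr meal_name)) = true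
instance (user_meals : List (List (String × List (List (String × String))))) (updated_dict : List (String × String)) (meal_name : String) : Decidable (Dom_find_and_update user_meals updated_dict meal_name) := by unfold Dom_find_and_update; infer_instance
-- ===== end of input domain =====

-- B is a pure one-pass rebuild (single scan with a 'found' flag) of A's mutate-in-place
-- two-pass update; equivalence is about the RETURN value only (A mutates user_meals in place, B does not).

-- shared library-style helper: Python's `dict(meal)` copy followed by `.update(updated_dict)`
-- (also the value of A's in-place `meal.update(updated_dict)`)
def pyDictUpdate (meal updated_dict : List (String × String)) : List (String × String) :=
  (updated_dict.foldl (fun m p => m.insert p.1 p.2) (PySem.Dict.mk meal)).items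

-- ===== PORT A =====
-- literal transliteration of A: per data, a membership pre-scan over data['meals'],
-- then either an update loop over the same list or an append; dict reads are exact
-- inside Pre_ (Python raises KeyError outside it, excluded below).
def find_and_update (user_meals : List (List (String × List (List (String × String))))) (updated_dict : List (String × String)) (meal_name : String) : List (List (String × List (List (String × String)))) :=
  user_meals.map (fun data =>
    let d := PySem.Dict.mk data
    let meals := d.getD "meals" []
    if (meals.map (fun k => (PySem.Dict.mk k).getD "meal" "")).contains meal_name then
      (d.modify "meals" [] (fun ms => ms.map (fun meal =>
        if (PySem.Dict.mk meal).getD "meal" "" == meal_name then pyDictUpdate meal updated_dict else meal))).items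
    else
      (d.modify "meals" [] (fun ms => ms ++ [updated_dict])).items)

-- ===== PORT B =====
-- literal transliteration of Source B: one fold over data['meals'] with state (new_meals, found),
-- `meal.get('meal') == meal_name` is the Option comparison, then `{**data, 'meals': new_meals}`.
def find_and_update_alt (user_meals : List (List (String × List (List (String × String))))) (updated_dict : List (String × String)) (meal_name : String) : List (List (String × List (List (String × String)))) :=
  user_meals.foldl (fun result data =>
    let d := PySem.Dict.mk data
    let s := (d.getD "meals" []).foldl
      (fun (acc : List (List (String × String)) × Bool) meal =>
        if (PySem.Dict.mk meal).get? "meal" == some meal_name then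
          (acc.1 ++ [pyDictUpdate meal updated_dict], true)
        else
          (acc.1 ++ [meal], acc.2)) ([], false)
    let new_meals := if s.2 then s.1 else s.1 ++ [updated_dict]
    result ++ [(d.insert "meals" new_meals).items]) []

-- ===== PRECONDITION & SPEC =====
-- Pre_ excludes exactly the inputs on which Python A raises KeyError:
-- some data without a 'meals' key, or some meal dict without a 'meal' key.
def Pre_find_and_update (user_meals : List (List (String × List (List (String × String))))) (updated_dict : List (String × String)) (meal_name : String) : Prop :=
  ∀ data ∈ user_meals, (PySem.Dict.mk data).contains "meals" = true ∧
    ∀ meal ∈ (PySem.Dict.mk data).getD "meals" ([] : List (List (String × String))),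
      (PySem.Dict.mk meal).contains "meal" = true
instance (user_meals : List (List (String × List (List (String × String))))) (updated_dict : List (String × String)) (meal_name : String) : Decidable (Pre_find_and_update user_meals updated_dict meal_name) := by unfold Pre_find_and_update; infer_instance
def pvWitness_find_and_update : (List (List (String × List (List (String × String))))) × (List (String × String)) × String :=
  ([[("meals", [[("meal", "a"), ("kcal", "100")], [("meal", "b")]])], [("meals", [])]], [("meal", "a"), ("kcal", "200")], "a")

def Spec_find_and_update (user_meals : List (List (String × List (List (String × String))))) (updated_dict : List (String × String)) (meal_name : String) (out : List (List (String × List (List (String × String))))) : Prop := out = find_and_update_alt user_meals updated_dict meal_name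
instance (user_meals : List (List (String × List (List (String × String))))) (updated_dict : List (String × String)) (meal_name : String) (out : List (List (String × List (List (String × String))))) : Decidable (Spec_find_and_update user_meals updated_dict meal_name out) := by unfold Spec_find_and_update; infer_instance

-- ===== CLAIM (what is proved, stated in full; the proofs are below) =====
def Claim_equal_find_and_update : Prop := ∀ (user_meals : List (List (String × List (List (String × String))))) (updated_dict : List (String × String)) (meal_name : String), Dom_find_and_update user_meals updated_dict meal_name → Pre_find_and_update user_meals updated_dict meal_name → Spec_find_and_update user_meals updated_dict meal_name (find_and_update user_meals updated_dict meal_name)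

-- ===== LEMMAS AND PROOFS =====

-- B's inner fold, first component: the rebuilt meal list, independent of the flag
theorem bloop_fst (ud : List (String × String)) (mn : String)
    (meals : List (List (String × String))) (acc : List (List (String × String))) (b : Bool) :
    (meals.foldl (fun (acc : List (List (String × String)) × Bool) meal =>
        if (PySem.Dict.mk meal).get? "meal" == some mn then
          (acc.1 ++ [pyDictUpdate meal ud], true)
        else (acc.1 ++ [meal], acc.2)) (acc, b)).1
      = acc ++ meals.map (fun meal =>
          if (PySem.Dict.mk meal).get? "meal" == some mn then pyDictUpdate meal ud else meal) := by
  induction meals generalizing acc b with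
  | nil => simp
  | cons m t ih =>
    rw [List.foldl_cons]
    by_cases h : ((PySem.Dict.mk m).get? "meal" == some mn) = true
    · rw [if_pos h, ih, List.map_cons, if_pos h]; simp
    · rw [if_neg h, ih, List.map_cons, if_neg h]; simp

-- B's inner fold, second component: the 'found' flag
theorem bloop_snd (ud : List (String × String)) (mn : String)
    (meals : List (List (String × String))) (acc : List (List (String × String))) (b : Bool) :
    (meals.foldl (fun (acc : List (List (String × String)) × Bool) meal =>
        if (PySem.Dict.mk meal).get? "meal" == some mn then
          (acc.1 ++ [pyDictUpdate meal ud], true)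
        else (acc.1 ++ [meal], acc.2)) (acc, b)).2
      = (b || meals.any (fun meal => (PySem.Dict.mk meal).get? "meal" == some mn)) := by
  induction meals generalizing acc b with
  | nil => simp
  | cons m t ih =>
    rw [List.foldl_cons, List.any_cons]
    by_cases h : ((PySem.Dict.mk m).get? "meal" == some mn) = true
    · rw [if_pos h, ih, h]; simp
    · rw [if_neg h, ih]
      have hf : ((PySem.Dict.mk m).get? "meal" == some mn) = false := Bool.eq_false_iff.mpr h
      rw [hf]; simp

-- when the meal has a 'meal' key, B's Option test equals A's getD test
theorem cond_eq (mn : String) (meal : List (String × String))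
    (h : (PySem.Dict.mk meal).contains "meal" = true) :
    ((PySem.Dict.mk meal).get? "meal" == some mn)
      = ((PySem.Dict.mk meal).getD "meal" "" == mn) := by
  have hs : ((PySem.Dict.mk meal).get? "meal").isSome := by
    rw [← PySem.Dict.contains_eq_isSome_get?]; exact h
  obtain ⟨v, hv⟩ := Option.isSome_iff_exists.mp hs
  simp [PySem.Dict.getD, hv]

-- A's membership test equals the any-test over A's getD condition
theorem contains_eq_any (mn : String) (meals : List (List (String × String))) :
    ((meals.map (fun k => (PySem.Dict.mk k).getD "meal" "")).contains mn)
      = meals.any (fun meal => (PySem.Dict.mk meal).getD "meal" "" == mn) := by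
  induction meals with
  | nil => simp
  | cons m t ih =>
    rw [List.map_cons, List.contains_cons, List.any_cons, ih, BEq.comm]

-- top-level B fold is a map
theorem bfold_eq_map (f : List (String × List (List (String × String))) → List (String × List (List (String × String))))
    (l : List (List (String × List (List (String × String)))))
    (init : List (List (String × List (List (String × String))))) :
    l.foldl (fun result data => result ++ [f data]) init = init ++ l.map f := by
  induction l generalizing init with
  | nil => simp
  | cons x t ih => simp [List.foldl_cons, ih]

-- per-data agreement of the two 'meals' values under the per-data precondition
theorem data_eq (ud : List (String × String)) (mn : String)
    (d : PySem.Dict String (List (List (String × String))))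
    (meals : List (List (String × String)))
    (hk : ∀ meal ∈ meals, (PySem.Dict.mk meal).contains "meal" = true) :
    (if (meals.map (fun k => (PySem.Dict.mk k).getD "meal" "")).contains mn then
       (d.insert "meals" (meals.map (fun meal =>
         if (PySem.Dict.mk meal).getD "meal" "" == mn then pyDictUpdate meal ud else meal))).items
     else (d.insert "meals" (meals ++ [ud])).items)
    = (d.insert "meals"
        (if (meals.foldl (fun (acc : List (List (String × String)) × Bool) meal =>
              if (PySem.Dict.mk meal).get? "meal" == some mn then
                (acc.1 ++ [pyDictUpdate meal ud], true)
              else (acc.1 ++ [meal], acc.2)) ([], false)).2 then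
           (meals.foldl (fun (acc : List (List (String × String)) × Bool) meal =>
              if (PySem.Dict.mk meal).get? "meal" == some mn then
                (acc.1 ++ [pyDictUpdate meal ud], true)
              else (acc.1 ++ [meal], acc.2)) ([], false)).1
         else
           (meals.foldl (fun (acc : List (List (String × String)) × Bool) meal =>
              if (PySem.Dict.mk meal).get? "meal" == some mn then
                (acc.1 ++ [pyDictUpdate meal ud], true)
              else (acc.1 ++ [meal], acc.2)) ([], false)).1 ++ [ud])).items := by
  rw [bloop_snd, bloop_fst, List.nil_append, Bool.false_or, contains_eq_any]
  have hany : (meals.any (fun meal => (PySem.Dict.mk meal).get? "meal" == some mn))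
      = meals.any (fun meal => (PySem.Dict.mk meal).getD "meal" "" == mn) := by
    rw [Bool.eq_iff_iff]
    simp only [List.any_eq_true]
    constructor
    · rintro ⟨meal, hmem, h⟩
      exact ⟨meal, hmem, by rw [← cond_eq mn meal (hk meal hmem)]; exact h⟩
    · rintro ⟨meal, hmem, h⟩
      exact ⟨meal, hmem, by rw [cond_eq mn meal (hk meal hmem)]; exact h⟩
  have hmap : meals.map (fun meal =>
        if (PySem.Dict.mk meal).get? "meal" == some mn then pyDictUpdate meal ud else meal)
      = meals.map (fun meal =>
        if (PySem.Dict.mk meal).getD "meal" "" == mn then pyDictUpdate meal ud else meal) :=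
    List.map_congr_left (fun meal hmem => by rw [cond_eq mn meal (hk meal hmem)])
  rw [hany, hmap]
  by_cases hc : meals.any (fun meal => (PySem.Dict.mk meal).getD "meal" "" == mn) = true
  · rw [if_pos hc, if_pos hc]
  · rw [if_neg hc, if_neg hc]
    have hid : meals.map (fun meal =>
          if (PySem.Dict.mk meal).getD "meal" "" == mn then pyDictUpdate meal ud else meal)
        = meals := by
      conv_rhs => rw [← List.map_id meals]
      apply List.map_congr_left
      intro meal hmem
      have hfalse : ((PySem.Dict.mk meal).getD "meal" "" == mn) = false := by
        cases h2 : ((PySem.Dict.mk meal).getD "meal" "" == mn) with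
        | false => rfl
        | true => exact absurd (List.any_eq_true.mpr ⟨meal, hmem, h2⟩) hc
      rw [hfalse]; rfl
    rw [hid]

-- ===== VERDICT (by name: the statement is the Claim_ definition above) =====
theorem find_and_update_spec : Claim_equal_find_and_update := by
  intro um ud mn _ hpre
  unfold Spec_find_and_update
  simp only [find_and_update, find_and_update_alt, PySem.Dict.modify]
  rw [bfold_eq_map, List.nil_append]
  apply List.map_congr_left
  intro data hmem
  exact data_eq ud mn (PySem.Dict.mk data)
    ((PySem.Dict.mk data).getD "meals" []) (hpre data hmem).2
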